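-- pv_equiv track=rewrite | github.com/henryzhongsc/lottery_regulated_grouped_kernel_pruning | utils.py | get_LTH_cluster_result
-- ===== SOURCE A (Python) =====
-- def get_LTH_cluster_result(LTH_result, n_clusters = 8):
--     LTH_result = [(i, v) for i, v in enumerate(LTH_result)]
--     LTH_result.sort(reverse=True, key = lambda t: t[1]) # sort by LTH criterion value.
--
--     single_cluster_size = len(LTH_result)/n_clusters
--
--     LTH_clusters = []
--
--     current_cluster_index = 0
--     number_of_pairs = int(len(LTH_result)/2)
--
--     for i in range(number_of_pairs):
--         if current_cluster_index > (n_clusters - 1):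
--             current_cluster_index = 0
--         highest_candidate = LTH_result.pop(0)
--         LTH_clusters.append((current_cluster_index,) + highest_candidate)
--         lowest_candidate = LTH_result.pop(-1)
--         LTH_clusters.append((current_cluster_index,) + lowest_candidate)
--
--         current_cluster_index += 1
--
--     LTH_clusters.sort(key = lambda t: t[1]) # sort by filter indices.
--
--     LTH_clusters_labels = [i[0] for i in LTH_clusters]
--
--     return LTH_clusters_labels
-- ===== SOURCE B (Python) =====
-- def get_LTH_cluster_result(LTH_result, n_clusters=8):
--     # Two symmetric pointers into the sorted order + direct label array
--     # (no repeated pop(0), no final sort).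
--     order = [i for i, _ in sorted(enumerate(LTH_result), key=lambda t: t[1], reverse=True)]
--     n = len(order)
--     labels = [None] * n
--     c = 0
--     for k in range(n // 2):
--         labels[order[k]] = c
--         labels[order[n - 1 - k]] = c
--         c += 1
--         if c > n_clusters - 1:
--             c = 0
--     return [lab for lab in labels if lab is not None]
-- ===== Notes on version B (the rewrite author's own statement) =====
-- stated objective: faster
-- what changed: Replaces the O(n^2) repeated pop(0)/pop(-1) and the final sort-by-index by two symmetric pointers into the sorted order that write each label directly into a position-indexed array.
import Mathlib
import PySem

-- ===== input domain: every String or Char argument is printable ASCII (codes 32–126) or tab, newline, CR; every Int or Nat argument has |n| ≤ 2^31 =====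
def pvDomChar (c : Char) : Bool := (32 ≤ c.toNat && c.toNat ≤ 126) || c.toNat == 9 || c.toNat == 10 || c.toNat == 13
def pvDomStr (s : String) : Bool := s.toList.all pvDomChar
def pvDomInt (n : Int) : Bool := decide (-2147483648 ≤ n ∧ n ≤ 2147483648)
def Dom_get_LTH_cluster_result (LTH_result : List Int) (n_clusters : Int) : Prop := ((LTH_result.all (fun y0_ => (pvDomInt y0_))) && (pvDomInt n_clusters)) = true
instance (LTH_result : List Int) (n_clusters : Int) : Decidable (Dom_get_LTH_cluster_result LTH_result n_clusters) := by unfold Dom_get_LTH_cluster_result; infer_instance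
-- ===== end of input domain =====

-- B replaces A's quadratic repeated pop(0)/pop(-1) and final sort-by-index by two symmetric
-- pointers into the sorted order writing each label straight into a position-indexed array.

-- ===== PORT A =====
def get_LTH_cluster_result (LTH_result : List Int) (n_clusters : Int) : List Int :=
  -- LTH_result = [(i, v) for i, v in enumerate(LTH_result)]; .sort(reverse=True, key=lambda t: t[1])
  let lst := PySem.List.sorted (PySem.List.enumerate LTH_result 0) (fun t => t.2) true
  -- single_cluster_size = len(LTH_result)/n_clusters : unused float; it raises iff n_clusters = 0 (excluded by Pre_)
  -- number_of_pairs = int(len(LTH_result)/2): exact float halving then truncation = floor division (0 ≤ len ≤ 2^31 < 2^53)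
  let number_of_pairs : Int := PySem.Int.floordiv (PySem.List.len lst) 2
  let st := (PySem.List.pyRange 0 number_of_pairs 1).foldl
    (fun (st : List (Int × Int) × List (Int × Int × Int) × Int) _ =>
      let L := st.1
      let acc := st.2.1
      let c0 := st.2.2
      let c := if c0 > n_clusters - 1 then 0 else c0
      match PySem.List.pop? L 0 with
      | none => (L, acc, c + 1)                       -- unreachable: Python would raise IndexError
      | some (highest, L1) =>
        match PySem.List.pop? L1 (-1) with
        | none => (L1, acc ++ [(c, highest)], c + 1)  -- unreachable: Python would raise IndexError
        | some (lowest, L2) => (L2, acc ++ [(c, highest)] ++ [(c, lowest)], c + 1))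
    (lst, ([] : List (Int × Int × Int)), (0 : Int))
  -- LTH_clusters.sort(key=lambda t: t[1]); [i[0] for i in LTH_clusters]
  (PySem.List.sorted st.2.1 (fun t => t.2.1) false).map (fun t => t.1)

-- ===== PORT B =====
def get_LTH_cluster_result_alt (LTH_result : List Int) (n_clusters : Int) : List Int :=
  -- order = [i for i, _ in sorted(enumerate(LTH_result), key=lambda t: t[1], reverse=True)]
  let order := (PySem.List.sorted (PySem.List.enumerate LTH_result 0) (fun t => t.2) true).map (fun t => t.1)
  let n := order.length
  -- labels = [None] * n; for k in range(n // 2): labels[order[k]] = c; labels[order[n-1-k]] = c; c += 1; wrap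
  let st := (PySem.List.pyRange 0 (PySem.Int.floordiv (n : Int) 2) 1).foldl
    (fun (st : List (Option Int) × Int) k =>
      let labels := st.1
      let c := st.2
      let labels := PySem.List.pySetD labels (PySem.List.pyGetD order k 0) (some c)
      let labels := PySem.List.pySetD labels (PySem.List.pyGetD order ((n : Int) - 1 - k) 0) (some c)
      (labels, if c + 1 > n_clusters - 1 then 0 else c + 1))
    (List.replicate n (none : Option Int), (0 : Int))
  -- return [lab for lab in labels if lab is not None]
  st.1.filterMap id

-- ===== PRECONDITION & SPEC =====
-- Pre_ excludes exactly n_clusters = 0, where A raises ZeroDivisionError (the line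
-- 'single_cluster_size = len(LTH_result)/n_clusters'); A returns on every other input.
def Pre_get_LTH_cluster_result (LTH_result : List Int) (n_clusters : Int) : Prop := n_clusters ≠ 0
instance (LTH_result : List Int) (n_clusters : Int) : Decidable (Pre_get_LTH_cluster_result LTH_result n_clusters) := by unfold Pre_get_LTH_cluster_result; infer_instance
def pvWitness_get_LTH_cluster_result : List Int × Int := ([3, 1, 2, 5], 2)

def Spec_get_LTH_cluster_result (LTH_result : List Int) (n_clusters : Int) (out : List Int) : Prop := out = get_LTH_cluster_result_alt LTH_result n_clusters
instance (LTH_result : List Int) (n_clusters : Int) (out : List Int) : Decidable (Spec_get_LTH_cluster_result LTH_result n_clusters out) := by unfold Spec_get_LTH_cluster_result; infer_instance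

-- ===== CLAIM (what is proved, stated in full; the proofs are below) =====
def Claim_equal_get_LTH_cluster_result : Prop := ∀ (LTH_result : List Int) (n_clusters : Int), Dom_get_LTH_cluster_result LTH_result n_clusters → Pre_get_LTH_cluster_result LTH_result n_clusters → Spec_get_LTH_cluster_result LTH_result n_clusters (get_LTH_cluster_result LTH_result n_clusters)

-- ===== LEMMAS AND PROOFS =====

-- The common pairing: labels (c, highest) and (c, lowest) for the outermost remaining pair, then recurse inward.
def pvPairs (nc : Int) : List (Int × Int) → Nat → Int → List (Int × Int × Int)
  | _, 0, _ => []
  | [], _ + 1, _ => []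
  | h :: t, p + 1, c =>
    (c, h) :: (c, t.getLastD h) :: pvPairs nc t.dropLast p (if c + 1 > nc - 1 then 0 else c + 1)

def pvSetStep (labels : List (Option Int)) (t : Int × Int × Int) : List (Option Int) :=
  PySem.List.pySetD labels t.2.1 (some t.1)

-- A's loop produces exactly the pvPairs triples (appended to the accumulator).
theorem pv_A_loop (nc : Int) (l : List Int) :
    ∀ (L : List (Int × Int)) (acc : List (Int × Int × Int)) (c0 : Int),
    2 * l.length ≤ L.length →
    ((l.foldl
      (fun (st : List (Int × Int) × List (Int × Int × Int) × Int) _ =>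
        let L := st.1
        let acc := st.2.1
        let c0 := st.2.2
        let c := if c0 > nc - 1 then 0 else c0
        match PySem.List.pop? L 0 with
        | none => (L, acc, c + 1)
        | some (highest, L1) =>
          match PySem.List.pop? L1 (-1) with
          | none => (L1, acc ++ [(c, highest)], c + 1)
          | some (lowest, L2) => (L2, acc ++ [(c, highest)] ++ [(c, lowest)], c + 1))
      (L, acc, c0)).2.1 : List (Int × Int × Int))
    = acc ++ pvPairs nc L l.length (if c0 > nc - 1 then 0 else c0) := by
  induction l with
  | nil =>
    intro L acc c0 _
    cases L <;> simp [pvPairs]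
  | cons x l ih =>
    intro L acc c0 hlen
    match L, hlen with
    | h :: t, hlen =>
      have ht : t ≠ [] := by
        intro hE; subst hE; simp at hlen; omega
      have hpop2 : PySem.List.pop? t (-1) = some (t.getLast ht, t.dropLast) := by
        conv_lhs => rw [← List.dropLast_append_getLast ht]
        exact PySem.List.pop?_last _ _
      simp only [List.foldl_cons, PySem.List.pop?_zero_cons, hpop2]
      rw [ih]
      · simp [pvPairs, List.getLastD_eq_getLast?, List.getLast?_eq_some_getLast ht]
      · simp at hlen ⊢
        omega
-- B's loop over k ∈ [pre.length, N/2) performs exactly the pvSetStep writes of pvPairs on the middle segment.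
theorem pv_B_loop (nc : Int) (fuel : Nat) :
    ∀ (L pre suf : List (Int × Int)) (c : Int) (labels : List (Option Int)),
    L.length ≤ fuel →
    suf.length = pre.length →
    (((PySem.List.pyRange (pre.length : Int) (((pre ++ L ++ suf).length / 2 : Nat) : Int) 1).foldl
      (fun (st : List (Option Int) × Int) k =>
        let labels := st.1
        let c := st.2
        let labels := PySem.List.pySetD labels (PySem.List.pyGetD ((pre ++ L ++ suf).map (fun t => t.1)) k 0) (some c)
        let labels := PySem.List.pySetD labels (PySem.List.pyGetD ((pre ++ L ++ suf).map (fun t => t.1)) ((((pre ++ L ++ suf).map (fun t : Int × Int => t.1)).length : Int) - 1 - k) 0) (some c)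
        (labels, if c + 1 > nc - 1 then 0 else c + 1))
      (labels, c)).1 : List (Option Int))
    = (pvPairs nc L (L.length / 2) c).foldl pvSetStep labels := by
  induction fuel with
  | zero =>
    intro L pre suf c labels hf hs
    have hL : L = [] := List.eq_nil_of_length_eq_zero (by omega)
    subst hL
    have : (pre ++ [] ++ suf).length / 2 = pre.length := by simp [hs]; omega
    rw [this, PySem.List.pyRange_one_eq_nil (le_refl _)]
    simp [pvPairs]
  | succ fuel ih =>
    intro L pre suf c labels hf hs
    match L with
    | [] =>
      have : (pre ++ [] ++ suf).length / 2 = pre.length := by simp [hs]; omega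
      rw [this, PySem.List.pyRange_one_eq_nil (le_refl _)]
      simp [pvPairs]
    | h :: t =>
      by_cases ht : t = []
      · subst ht
        have : (pre ++ [h] ++ suf).length / 2 = pre.length := by simp [hs]; omega
        rw [this, PySem.List.pyRange_one_eq_nil (le_refl _)]
        simp [pvPairs]
      · -- main step: t ≠ []
        have htl : 0 < t.length := List.length_pos_of_ne_nil ht
        have hN : (pre ++ (h :: t) ++ suf).length = 2 * pre.length + t.length + 1 := by
          simp [hs]; omega
        have hlt : (pre.length : Int) < (((pre ++ (h :: t) ++ suf).length / 2 : Nat) : Int) := by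
          have : pre.length < (pre ++ (h :: t) ++ suf).length / 2 := by omega
          exact_mod_cast this
        rw [PySem.List.pyRange_one_cons hlt, List.foldl_cons]
        have hmap1 : (pre ++ (h :: t) ++ suf).map (fun t : Int × Int => t.1)
            = pre.map (fun t : Int × Int => t.1) ++ h.1 :: (t ++ suf).map (fun t : Int × Int => t.1) := by
          simp
        have hi : PySem.List.pyGetD ((pre ++ (h :: t) ++ suf).map (fun t : Int × Int => t.1)) (pre.length : Int) 0 = h.1 := by
          have hg := PySem.List.pyGet?_append_length (pre.map (fun t : Int × Int => t.1)) ((t ++ suf).map (fun t : Int × Int => t.1)) h.1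
          simp only [List.length_map] at hg
          rw [hmap1]
          simp [PySem.List.pyGetD]
        have E : pre ++ (h :: t) ++ suf = (pre ++ [h]) ++ t.dropLast ++ (t.getLast ht :: suf) := by
          conv_lhs => rw [← List.dropLast_append_getLast ht]
          simp
        have hmap2 : (pre ++ (h :: t) ++ suf).map (fun t : Int × Int => t.1)
            = (pre ++ h :: t.dropLast).map (fun t : Int × Int => t.1) ++ (t.getLast ht).1 :: suf.map (fun t : Int × Int => t.1) := by
          rw [E]; simp
        have hj : PySem.List.pyGetD ((pre ++ (h :: t) ++ suf).map (fun t : Int × Int => t.1))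
            ((((pre ++ (h :: t) ++ suf).map (fun t : Int × Int => t.1)).length : Int) - 1 - (pre.length : Int)) 0 = (t.getLast ht).1 := by
          have hg := PySem.List.pyGet?_append_length ((pre ++ h :: t.dropLast).map (fun t : Int × Int => t.1)) (suf.map (fun t : Int × Int => t.1)) (t.getLast ht).1
          have hidx : (((pre ++ (h :: t) ++ suf).map (fun t : Int × Int => t.1)).length : Int) - 1 - (pre.length : Int)
              = (((pre ++ h :: t.dropLast).map (fun t : Int × Int => t.1)).length : Int) := by
            simp [hs, List.length_dropLast]
            omega
          rw [hidx, hmap2]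
          simp only [PySem.List.pyGetD, hg, Option.getD_some]
        simp only []
        rw [hi, hj]
        have hp2 : (h :: t).length / 2 = t.dropLast.length / 2 + 1 := by
          simp [List.length_dropLast]; omega
        rw [hp2]
        rw [show pvPairs nc (h :: t) (t.dropLast.length / 2 + 1) c
            = (c, h) :: (c, t.getLastD h) :: pvPairs nc t.dropLast (t.dropLast.length / 2) (if c + 1 > nc - 1 then 0 else c + 1) from rfl]
        rw [List.foldl_cons, List.foldl_cons]
        have hgd : t.getLastD h = t.getLast ht := by
          rw [List.getLastD_eq_getLast?, List.getLast?_eq_some_getLast ht]; rfl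
        have hstep : List.foldl pvSetStep labels [(c, h), (c, t.getLastD h)]
            = PySem.List.pySetD (PySem.List.pySetD labels h.1 (some c)) (t.getLast ht).1 (some c) := by
          rw [show ((c, t.getLastD h) : Int × Int × Int) = (c, t.getLast ht) from by rw [hgd]]
          rfl
        simp only [List.foldl_cons, List.foldl_nil] at hstep
        rw [hstep]
        have hstart : (pre.length : Int) + 1 = (((pre ++ [h]).length : Nat) : Int) := by simp
        rw [E, hstart]
        exact ih t.dropLast (pre ++ [h]) (t.getLast ht :: suf) _ _
          (by simp [List.length_dropLast] at hf ⊢; omega) (by simp [hs])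
-- Every triple's payload comes from the paired list.
theorem pv_pairs_mem (nc : Int) (p : Nat) :
    ∀ (L : List (Int × Int)) (c : Int), 2 * p ≤ L.length →
    ∀ (t : Int × Int × Int), t ∈ pvPairs nc L p c → t.2 ∈ L := by
  induction p with
  | zero =>
    intro L c _ t hm
    cases L <;> simp [pvPairs] at hm
  | succ p ih =>
    intro L c hlen t hm
    match L with
    | h :: tl =>
      have htl : tl ≠ [] := by intro hE; subst hE; simp at hlen; omega
      have hgd : tl.getLastD h = tl.getLast htl := by
        rw [List.getLastD_eq_getLast?, List.getLast?_eq_some_getLast htl]; rfl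
      simp only [pvPairs, List.mem_cons] at hm
      rcases hm with h1 | h2 | h3
      · subst h1; simp
      · subst h2
        simp only [hgd]
        exact List.mem_cons_of_mem _ (List.getLast_mem htl)
      · have := ih tl.dropLast _ (by simp [List.length_dropLast] at hlen ⊢; omega) t h3
        exact List.mem_cons_of_mem _ (List.dropLast_subset _ this)
-- Distinct source indices give distinct triple indices.
theorem pv_pairs_nodup (nc : Int) (p : Nat) :
    ∀ (L : List (Int × Int)) (c : Int), 2 * p ≤ L.length →
    (L.map (fun t => t.1)).Nodup →
    ((pvPairs nc L p c).map (fun t => t.2.1)).Nodup := by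
  induction p with
  | zero =>
    intro L c _ _
    cases L <;> simp [pvPairs]
  | succ p ih =>
    intro L c hlen hnd
    match L with
    | h :: tl =>
      have htl : tl ≠ [] := by intro hE; subst hE; simp at hlen; omega
      have hgd : tl.getLastD h = tl.getLast htl := by
        rw [List.getLastD_eq_getLast?, List.getLast?_eq_some_getLast htl]; rfl
      have hsplit : tl = tl.dropLast ++ [tl.getLast htl] := (List.dropLast_append_getLast htl).symm
      have hdl2 : 2 * p ≤ tl.dropLast.length := by
        simp [List.length_dropLast] at hlen ⊢
        have : 0 < tl.length := List.length_pos_of_ne_nil htl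
        omega
      simp only [pvPairs, List.map_cons, List.nodup_cons] at hnd ⊢
      obtain ⟨hh, hndtl⟩ := hnd
      have hndapp := hndtl
      rw [hsplit, List.map_append, List.nodup_append] at hndapp
      obtain ⟨hnddl, hndg, hdisj⟩ := hndapp
      have hsub : ∀ x ∈ (pvPairs nc tl.dropLast p (if c + 1 > nc - 1 then 0 else c + 1)).map (fun t => t.2.1),
          x ∈ tl.dropLast.map (fun t => t.1) := by
        intro x hx
        obtain ⟨t, htmem, rfl⟩ := List.mem_map.mp hx
        exact List.mem_map_of_mem (pv_pairs_mem nc p _ _ hdl2 t htmem)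
      refine ⟨?_, ?_, ih tl.dropLast _ hdl2 hnddl⟩
      · simp only [hgd, List.mem_cons]
        rintro (hEq | hmem)
        · exact hh (hEq ▸ List.mem_map_of_mem (List.getLast_mem htl))
        · exact hh (by
            have := hsub _ hmem
            rw [hsplit, List.map_append]
            exact List.mem_append_left _ this)
      · simp only [hgd]
        intro hmem
        exact hdisj _ (hsub _ hmem) _ (by simp) rfl
-- Writing the triples into an array of n slots yields the find?-table over range n.
theorem pv_foldl_set_gen (n : Nat) :
    ∀ (C : List (Int × Int × Int)) (st : List (Option Int)), st.length = n →
    (∀ t ∈ C, ∃ k : Nat, t.2.1 = (k : Int) ∧ k < n) →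
    ((C.map (fun t => t.2.1)).Nodup) →
    C.foldl pvSetStep st
    = (List.range n).map (fun (i : Nat) => ((C.find? (fun t => t.2.1 == (i : Int))).map (fun t => t.1)).or (st.getD i none)) := by
  intro C
  induction C with
  | nil =>
    intro st hlen _ _
    simp only [List.foldl_nil, List.find?_nil, Option.map_none, Option.none_or]
    apply List.ext_getElem (by simp [hlen])
    intro i h1 h2
    simp only [List.getElem_map, List.getElem_range]
    rw [List.getD_eq_getElem st none (by omega)]
  | cons t C' ih =>
    intro st hlen hb hnd
    obtain ⟨k, hk, hkn⟩ := hb t (by simp)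
    have hset : pvSetStep st t = st.set k (some t.1) := by
      rw [pvSetStep, PySem.List.pySetD_of_nonneg st _ (by omega), hk]
      simp
    simp only [List.foldl_cons]
    rw [ih (pvSetStep st t) (by rw [hset]; simp [hlen])
        (fun t' ht' => hb t' (by simp [ht'])) (by simp at hnd; exact hnd.2)]
    apply List.map_congr_left
    intro i hi
    have hin : i < n := List.mem_range.mp hi
    by_cases hb2 : t.2.1 = (i : Int)
    · -- head matches
      have hik : i = k := by omega
      subst hik
      rw [List.find?_cons_of_pos (p := fun t' : Int × Int × Int => t'.2.1 == ((i : Nat) : Int)) (by simp [hb2])]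
      have hnone : C'.find? (fun t' => t'.2.1 == (i : Int)) = none := by
        apply List.find?_eq_none.mpr
        intro t' ht'
        simp only [beq_iff_eq]
        intro hEq
        simp only [List.map_cons, List.nodup_cons] at hnd
        apply hnd.1
        have : t'.2.1 = t.2.1 := by rw [hEq, hb2]
        exact this ▸ List.mem_map_of_mem ht'
      rw [hnone]
      simp only [Option.map_none, Option.none_or, Option.map_some, Option.some_or]
      rw [hset, List.getD_eq_getElem _ none (by simp [hlen]; omega)]
      simp [List.getElem_set_self]
    · rw [List.find?_cons_of_neg (p := fun t' : Int × Int × Int => t'.2.1 == ((i : Nat) : Int)) (by simp [hb2])]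
      have : (pvSetStep st t).getD i none = st.getD i none := by
        rw [hset]
        rcases Nat.lt_or_ge i st.length with hlt | hge
        · rw [List.getD_eq_getElem _ none (by simp; omega), List.getD_eq_getElem _ none hlt]
          rw [List.getElem_set_ne (by omega)]
        · rw [List.getD_eq_default _ none (by simp; omega), List.getD_eq_default _ none hge]
      rw [this]
-- Sorting the triples by index is the find?-traversal of range n.
theorem pv_sorted_eq (C : List (Int × Int × Int)) (n : Nat)
    (hb : ∀ t ∈ C, ∃ k : Nat, t.2.1 = (k : Int) ∧ k < n)
    (hnd : (C.map (fun t => t.2.1)).Nodup) :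
    PySem.List.sorted C (fun t => t.2.1) false
    = (List.range n).filterMap (fun (i : Nat) => C.find? (fun t => t.2.1 == (i : Int))) := by
  set T := (List.range n).filterMap (fun (i : Nat) => C.find? (fun t => t.2.1 == (i : Int))) with hT
  have hpairT : T.Pairwise (fun a b => a.2.1 < b.2.1) := by
    rw [hT]
    rw [List.pairwise_filterMap]
    apply List.Pairwise.imp ?_ (List.pairwise_lt_range)
    intro a b hab x hx y hy
    have hxa : x.2.1 = (a : Int) := by simpa using (List.find?_some hx)
    have hyb : y.2.1 = (b : Int) := by simpa using (List.find?_some hy)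
    rw [hxa, hyb]
    exact_mod_cast hab
  have hndC : C.Nodup := List.Nodup.of_map _ hnd
  have hndT : T.Nodup := hpairT.imp (fun h hEq => by subst hEq; exact lt_irrefl _ h)
  have hmem : ∀ x, x ∈ T ↔ x ∈ C := by
    intro x
    constructor
    · intro hx
      obtain ⟨i, _, hfind⟩ := List.mem_filterMap.mp hx
      exact List.mem_of_find?_eq_some hfind
    · intro hx
      obtain ⟨k, hk, hkn⟩ := hb x hx
      have hsome : (C.find? (fun t => t.2.1 == (k : Int))).isSome := by
        apply List.find?_isSome.mpr
        exact ⟨x, hx, by simp [hk]⟩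
      obtain ⟨y, hy⟩ := Option.isSome_iff_exists.mp hsome
      have hyC : y ∈ C := List.mem_of_find?_eq_some hy
      have hyk : y.2.1 = (k : Int) := by simpa using (List.find?_some hy)
      have hxy : y = x := List.inj_on_of_nodup_map hnd hyC hx (by rw [hyk, hk])
      exact List.mem_filterMap.mpr ⟨k, List.mem_range.mpr hkn, hxy ▸ hy⟩
  have hperm : T.Perm C := List.perm_of_nodup_nodup_toFinset_eq hndT hndC
    (by ext x; simp [List.mem_toFinset, hmem x])
  exact PySem.List.sorted_eq_of_perm_of_pairwise_lt C T _ hperm hpairT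
theorem pv_main (xs : List Int) (nc : Int) :
    get_LTH_cluster_result xs nc = get_LTH_cluster_result_alt xs nc := by
  simp only [get_LTH_cluster_result, get_LTH_cluster_result_alt]
  set S := PySem.List.sorted (PySem.List.enumerate xs 0) (fun t => t.2) true with hS
  set n := xs.length with hn
  have hSlen : S.length = n := by
    rw [hS, PySem.List.length_sorted, PySem.List.length_enumerate]
  have hnp : PySem.Int.floordiv (PySem.List.len S) 2 = ((n / 2 : Nat) : Int) := by
    rw [PySem.List.len_eq, hSlen]
    exact_mod_cast PySem.Int.floordiv_natCast n 2
  rw [hnp]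
  rw [pv_A_loop nc (PySem.List.pyRange 0 ((n / 2 : Nat) : Int) 1) S [] 0
    (by rw [PySem.List.length_pyRange_one, hSlen]; omega)]
  have hlen' : (PySem.List.pyRange 0 ((n / 2 : Nat) : Int) 1).length = n / 2 := by
    rw [PySem.List.length_pyRange_one]; simp; omega
  have hnorm : (if (0 : Int) > nc - 1 then (0 : Int) else 0) = 0 := ite_self 0
  rw [hlen', List.nil_append, hnorm]
  simp only [List.length_map, hSlen]
  rw [show PySem.Int.floordiv ((n : Nat) : Int) 2 = ((n / 2 : Nat) : Int) from by
    exact_mod_cast PySem.Int.floordiv_natCast n 2]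
  have hB := pv_B_loop nc S.length S [] [] 0 (List.replicate n none) (le_refl _) rfl
  simp only [List.nil_append, List.append_nil, List.length_nil, Nat.cast_zero,
    List.length_map, hSlen] at hB
  rw [hB]
  have h2p : 2 * (n / 2) ≤ S.length := by rw [hSlen]; omega
  have hSperm : S.Perm (PySem.List.enumerate xs 0) := PySem.List.sorted_perm _ _ _
  have hbounds : ∀ t ∈ pvPairs nc S (n / 2) 0, ∃ k : Nat, t.2.1 = (k : Int) ∧ k < n := by
    intro t ht
    have hmemS := pv_pairs_mem nc (n / 2) S 0 h2p t ht
    have hmemE : t.2 ∈ PySem.List.enumerate xs 0 := hSperm.subset hmemS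
    obtain ⟨k, hk, hEq⟩ := (PySem.List.mem_enumerate_iff xs 0 t.2).mp hmemE
    exact ⟨k, by rw [hEq]; simp, by omega⟩
  have hSnodup : (S.map (fun t => t.1)).Nodup := by
    rw [(hSperm.map (fun t : Int × Int => t.1)).nodup_iff]
    rw [PySem.List.map_fst_enumerate]
    exact PySem.List.nodup_pyRange_one _ _
  have hCnd := pv_pairs_nodup nc (n / 2) S 0 h2p hSnodup
  rw [pv_sorted_eq _ n hbounds hCnd]
  rw [pv_foldl_set_gen n _ (List.replicate n none) (by simp) hbounds hCnd]
  have hrep : ∀ i : Nat, (List.replicate n (none : Option Int)).getD i none = none := by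
    intro i
    rcases Nat.lt_or_ge i n with h | h
    · rw [List.getD_eq_getElem _ _ (by simpa using h)]; simp
    · rw [List.getD_eq_default _ _ (by simpa using h)]
  simp only [hrep, Option.or_none]
  rw [List.map_filterMap, List.filterMap_map]
  simp

-- ===== VERDICT (by name: the statement is the Claim_ definition above) =====
theorem get_LTH_cluster_result_spec : Claim_equal_get_LTH_cluster_result := by
  intro xs nc _ _
  exact pv_main xs nc
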